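-- pv_equiv track=rewrite | github.com/RyanRoessler/Bioinformatics-Codebase | Bioinformatics_Functions.py | neighbors_V2
-- ===== SOURCE A (Python) =====
-- def hamming_distance(seq1, seq2):
--
--     # Ensure lengths of sequences are equal
--     if len(seq1) != len(seq2):
--         raise ValueError("Sequences must be the same length")
--
--     return sum([1 for nuc in range(len(seq1)) if seq1[nuc] != seq2[nuc]])
--
-- def neighbors_V2(pattern, d):
--     """
--     Use recursion to generate all possible neighbors with d or fewer mismatches for the suffix of pattern (i.e. pattern[1:])
--     Check hamming dist. between suffix neighbors and pattern. If < d, introduce 4 new neighbors by changing first nucleotide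
--         If = d, keep original nucleotide the same and add the neighbor
--     """
--
--     # Case: d = 0
--     if d == 0:
--         return {pattern}
--
--     # Case: pattern is 1 nucleotide
--     if len(pattern) == 1:
--         return set('ACGT')
--
--     # Case: d > 0 and pattern > 1 nucleotide
--     # Initialize neighborhood set (avoid duplicates)
--     neighborhood = set()
--
--     # Use recursion to iterate over all possible mismatches for the suffix (excluding the first nucleotide)
--         # Generate all possible neighbors of the suffix with d or fewer mismatches
--             # Example: pattern = 'ACGT'
--             # When recursion reaches the last nucleotide ('T'), it calls itself with a pattern = 1 nucleotide and generates A,C,G,T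
--             # Then it calls itself with pattern = 'GT', and checks hamming_dist('T', suffix neighbors ('A,C,G,T'))
--                 # This generates suffix neighbors ('GA', 'GC', etc.)
--             # Then it calls iself with pattern = 'CGT' and generates ('CAT', 'CAA', etc.)
--     suffix_neighbors = neighbors_V2(pattern[1:], d)
--
--     for neighbor in suffix_neighbors:
--
--         # If the Hamming distace between the pattern and the suffix neighbor is < d, the neighbor differs by at most d mismatches
--         if hamming_distance(pattern[1:], neighbor) < int(d):
--
--             for nuc in 'ACGT':
--                 # Concatenate each of the four nucleotides to the suffix of the pattern, handling mismatches for the first nucleotide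
--                 neighborhood.add(nuc + neighbor)
--
--         # If Hamming dist. between pattern and suffix neighbor = d, it is already a neighbor using the original first nucleotide
--             # the Hamming dist. cannot be > d because of the nature of the recursive call
--         else:
--             neighborhood.add(pattern[0] + neighbor)
--
--     # Get neighborhood as a list
--     result = list(neighborhood)
--     # Sort alphabetically
--     result.sort()
--
--     return result
-- ===== SOURCE B (Python) =====
-- def neighbors_V2(pattern, d):
--     # Iterative right-to-left pass that carries each candidate's Hamming distance
--     # alongside it, so the distance is never recomputed by rescanning the strings.
--     if d == 0:
--         return {pattern}
--     if len(pattern) == 1: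
--         return set('ACGT')
--     last = pattern[-1]
--     current = {(c, 0 if c == last else 1) for c in 'ACGT'}
--     for ch in reversed(pattern[:-1]):
--         step = set()
--         for t, k in current:
--             if k < d:
--                 for c in 'ACGT':
--                     step.add((c + t, k + (1 if c != ch else 0)))
--             else:
--                 step.add((ch + t, k))
--         current = step
--     return sorted(t for t, _ in current)
-- ===== Notes on version B (the rewrite author's own statement) =====
-- stated objective: faster
-- what changed: Replaces A's suffix recursion (which sorts at every level and recomputes a full Hamming-distance scan for every candidate at every level) with a single iterative right-to-left pass that carries each candidate's distance as a counter in a set of (string, distance) pairs, sorting once at the end; Pre_ excludes the inputs with d == 0 or a one-character pattern, on which A returns a Python set instead of the declared list[str] (B returns the same set there), and the empty pattern with d != 0, on which A hits the recursion limit and B raises IndexError.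
-- outside the precondition, e.g. on neighbors_V2('ACG', 0): A returns {'ACG'}, B returns {'ACG'}; on neighbors_V2('G', 5): A returns {'T', 'C', 'G', 'A'}, B returns {'T', 'C', 'G', 'A'}; on neighbors_V2('', 2): A raises RecursionError, B raises IndexError
import Mathlib
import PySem

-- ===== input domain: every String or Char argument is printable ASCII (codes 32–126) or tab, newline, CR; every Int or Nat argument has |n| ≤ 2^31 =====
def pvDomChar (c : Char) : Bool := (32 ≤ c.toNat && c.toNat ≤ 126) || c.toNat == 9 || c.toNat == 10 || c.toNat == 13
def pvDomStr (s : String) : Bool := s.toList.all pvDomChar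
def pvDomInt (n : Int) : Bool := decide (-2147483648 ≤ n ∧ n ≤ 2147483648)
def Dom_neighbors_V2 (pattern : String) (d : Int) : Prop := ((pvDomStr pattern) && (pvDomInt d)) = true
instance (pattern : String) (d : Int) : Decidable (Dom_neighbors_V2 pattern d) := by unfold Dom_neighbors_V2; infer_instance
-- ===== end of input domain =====

-- B replaces A's suffix recursion (re-sorting every level and rescanning a Hamming distance per candidate)
-- with one iterative right-to-left pass carrying each candidate's distance as a counter; same return values.

-- ===== PORT A =====
-- hamming_distance: `none` is the ValueError on unequal lengths (call sites below always pass equal lengths)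
def hammingA (seq1 seq2 : List Char) : Option Int :=
  if seq1.length ≠ seq2.length then none
  else some ((((PySem.List.pyRange 0 seq1.length 1).filter
      (fun nuc => PySem.List.pyGet? seq1 nuc != PySem.List.pyGet? seq2 nuc)).map
      (fun _ => (1 : Int))).sum)

def neighborsA (p : List Char) (d : Int) : List (List Char) :=
  if d = 0 then [p]
  else
    match p with
    | [] => []          -- Python recurses forever here (RecursionError); excluded by Pre_neighbors_V2
    | [_] => [['A'], ['C'], ['G'], ['T']]
    | c :: rest =>
      let nb : PySem.Set (List Char) :=
        (neighborsA rest d).foldl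
          (fun acc t =>
            if (hammingA rest t).getD 0 < d then      -- hammingA is always `some` here (equal lengths)
              ['A', 'C', 'G', 'T'].foldl (fun a2 nuc => PySem.Set.add a2 (nuc :: t)) acc
            else PySem.Set.add acc (c :: t))
          PySem.Set.empty
      PySem.List.sorted nb (fun x => x) false

def neighbors_V2 (pattern : String) (d : Int) : List String :=
  (neighborsA pattern.toList d).map (fun t => String.ofList t)

-- ===== PORT B =====
-- one step of B's loop: merge the next character to the left into the candidate (string, distance) set
def stepB (d : Int) (cur : PySem.Set (List Char × Int)) (ch : Char) : PySem.Set (List Char × Int) :=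
  cur.foldl
    (fun st tk =>
      if tk.2 < d then
        ['A', 'C', 'G', 'T'].foldl
          (fun s2 c => PySem.Set.add s2 (c :: tk.1, tk.2 + (if c != ch then 1 else 0))) st
      else PySem.Set.add st (ch :: tk.1, tk.2))
    PySem.Set.empty

def neighbors_V2_alt (pattern : String) (d : Int) : List String :=
  let p := pattern.toList
  if d = 0 then [pattern]
  else if p.length = 1 then ["A", "C", "G", "T"]
  else
    match PySem.List.pyGet? p (-1) with     -- pattern[-1]
    | none => []      -- empty pattern: Python raises IndexError here; excluded by Pre_neighbors_V2
    | some last =>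
      let init : PySem.Set (List Char × Int) :=
        PySem.Set.ofList (['A', 'C', 'G', 'T'].map (fun c => ([c], if c == last then (0 : Int) else 1)))
      -- for ch in reversed(pattern[:-1]):  (pattern[:-1] = dropLast, cf. PySem.Str.slice_to_neg_one)
      let final := (p.dropLast.reverse).foldl (stepB d) init
      (PySem.List.sorted (final.map (fun tk => tk.1)) (fun x => x) false).map (fun t => String.ofList t)

-- ===== PRECONDITION & SPEC =====
-- Pre_ excludes the empty pattern with d ≠ 0 (Python A recurses forever — RecursionError; Python B
-- raises IndexError on pattern[-1]) and the inputs with d == 0 or len(pattern) == 1, on which A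
-- returns a Python set instead of the declared list[str] (B returns the same set there).
def Pre_neighbors_V2 (pattern : String) (d : Int) : Prop :=
  pattern.toList ≠ [] ∧ d ≠ 0 ∧ pattern.toList.length ≠ 1
instance (pattern : String) (d : Int) : Decidable (Pre_neighbors_V2 pattern d) := by
  unfold Pre_neighbors_V2; infer_instance
def pvWitness_neighbors_V2 : String × Int := ("ACG", 1)

def Spec_neighbors_V2 (pattern : String) (d : Int) (out : List String) : Prop := out = neighbors_V2_alt pattern d
instance (pattern : String) (d : Int) (out : List String) : Decidable (Spec_neighbors_V2 pattern d out) := by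
  unfold Spec_neighbors_V2; infer_instance

-- ===== CLAIM (what is proved, stated in full; the proofs are below) =====
def Claim_equal_neighbors_V2 : Prop := ∀ (pattern : String) (d : Int), Dom_neighbors_V2 pattern d → Pre_neighbors_V2 pattern d → Spec_neighbors_V2 pattern d (neighbors_V2 pattern d)

-- ===== LEMMAS AND PROOFS =====

-- Hamming distance as a count over the zipped lists (proof-side model of hammingA and of B's counters)
def hamZ (xs ys : List Char) : Int := ((xs.zip ys).countP (fun pq => pq.1 != pq.2) : Int)

theorem hamZ_cons (a b : Char) (xs ys : List Char) :
    hamZ (a :: xs) (b :: ys) = hamZ xs ys + (if a != b then 1 else 0) := by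
  simp only [hamZ, List.zip_cons_cons, List.countP_cons]
  by_cases h : (a != b) = true <;> simp [h]

theorem ite_beq_flip (x y : Char) : (if x == y then (0 : Int) else 1) = (if y != x then 1 else 0) := by
  by_cases h : x = y
  · subst h; simp
  · simp [h, Ne.symm h]

theorem bne_flip (x y : Char) : (x != y) = (y != x) := by
  by_cases h : x = y
  · subst h; rfl
  · have h1 : (x == y) = false := beq_eq_false_iff_ne.mpr h
    have h2 : (y == x) = false := beq_eq_false_iff_ne.mpr (Ne.symm h)
    simp [bne, h1, h2]

theorem base_snd (c a : Char) : (if c == a then (0 : Int) else 1) = hamZ [a] [c] := by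
  rw [hamZ_cons a c [] [], ite_beq_flip c a]
  simp [hamZ]

theorem sum_map_one {α : Type} (l : List α) : (l.map (fun _ => (1 : Int))).sum = (l.length : Int) := by
  induction l with
  | nil => simp
  | cons x l ih => simp [ih]; omega

theorem cnt_aux : ∀ (q t : List Char), t.length = q.length →
    (List.range q.length).countP
      (fun (k : Nat) => PySem.List.pyGet? q ((k : Nat) : Int) != PySem.List.pyGet? t ((k : Nat) : Int))
    = (q.zip t).countP (fun pq => pq.1 != pq.2) := by
  intro q
  induction q with
  | nil => intro t ht; rfl
  | cons a q ih =>
    intro t ht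
    cases t with
    | nil => simp at ht
    | cons b t =>
      simp only [List.length_cons] at ht
      have ht' : t.length = q.length := by omega
      have hbne : (some a != some b) = (a != b) := rfl
      have hstep : ∀ k ∈ List.range q.length,
          ((fun (k : Nat) => PySem.List.pyGet? (a :: q) ((k : Nat) : Int) != PySem.List.pyGet? (b :: t) ((k : Nat) : Int)) ∘ Nat.succ) k
          = (fun (k : Nat) => PySem.List.pyGet? q ((k : Nat) : Int) != PySem.List.pyGet? t ((k : Nat) : Int)) k := by
        intro k _
        have hc : ((Nat.succ k : Nat) : Int) = ((k : Nat) : Int) + 1 := by push_cast; ring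
        simp only [Function.comp_apply, hc, PySem.List.pyGet?_cons_succ]
      rw [List.length_cons, List.range_succ_eq_map, List.countP_cons, List.countP_map,
        List.countP_congr (fun k hk => by rw [hstep k hk]), ih t ht', List.zip_cons_cons, List.countP_cons]
      simp [PySem.List.pyGet?_zero_cons, hbne]

theorem hammingA_eq (q t : List Char) (h : t.length = q.length) :
    hammingA q t = some (hamZ q t) := by
  unfold hammingA
  rw [if_neg (by simp [h])]
  congr 1
  rw [sum_map_one, hamZ]
  norm_cast
  rw [← List.countP_eq_length_filter, PySem.List.pyRange_one]
  simp only [sub_zero, Int.toNat_natCast]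
  rw [List.countP_map]
  have hpred : ∀ k ∈ List.range q.length,
      ((fun nuc => PySem.List.pyGet? q nuc != PySem.List.pyGet? t nuc) ∘ (fun (k : Nat) => (0 : Int) + (k : Nat))) k
      = (fun (k : Nat) => PySem.List.pyGet? q ((k : Nat) : Int) != PySem.List.pyGet? t ((k : Nat) : Int)) k := by
    intro k _
    simp
  rw [List.countP_congr (fun k hk => by rw [hpred k hk]), cnt_aux q t h]

-- membership and nodup of a foldl of Set.update steps
theorem mem_foldl_update {α β : Type} [BEq β] [LawfulBEq β] (g : α → List β) (l : List α) :
    ∀ (acc : PySem.Set β) (y : β),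
      (y ∈ l.foldl (fun s x => PySem.Set.update s (g x)) acc ↔ y ∈ acc ∨ ∃ x ∈ l, y ∈ g x) := by
  induction l with
  | nil => intro acc y; simp
  | cons x l ih =>
      intro acc y
      simp only [List.foldl_cons, ih, PySem.Set.mem_update, List.mem_cons]
      constructor
      · rintro ((h | h) | ⟨z, hz, hy⟩)
        · exact Or.inl h
        · exact Or.inr ⟨x, Or.inl rfl, h⟩
        · exact Or.inr ⟨z, Or.inr hz, hy⟩
      · rintro (h | ⟨z, (rfl | hz), hy⟩)
        · exact Or.inl (Or.inl h)
        · exact Or.inl (Or.inr hy)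
        · exact Or.inr ⟨z, hz, hy⟩

theorem nodup_foldl_update {α β : Type} [BEq β] [LawfulBEq β] (g : α → List β) (l : List α) :
    ∀ (acc : PySem.Set β), acc.Nodup →
      (l.foldl (fun s x => PySem.Set.update s (g x)) acc).Nodup := by
  induction l with
  | nil => intro acc h; simpa using h
  | cons x l ih =>
      intro acc h
      exact ih _ (PySem.Set.nodup_update _ _ h)

-- A's loop body is a Set.update of the generated candidates
theorem bodyA_eq (c : Char) (rest : List Char) (d : Int) :
    (fun (acc : PySem.Set (List Char)) t =>
        if (hammingA rest t).getD 0 < d then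
          ['A', 'C', 'G', 'T'].foldl (fun a2 nuc => PySem.Set.add a2 (nuc :: t)) acc
        else PySem.Set.add acc (c :: t))
      = (fun acc t => PySem.Set.update acc
          (if (hammingA rest t).getD 0 < d then ['A', 'C', 'G', 'T'].map (fun nuc => nuc :: t)
           else [c :: t])) := by
  funext acc t
  split_ifs with h
  · rfl
  · rfl

-- B's loop body is a Set.update of the generated candidates
theorem bodyB_eq (ch : Char) (d : Int) :
    (fun (st : PySem.Set (List Char × Int)) (tk : List Char × Int) =>
        if tk.2 < d then
          ['A', 'C', 'G', 'T'].foldl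
            (fun s2 c => PySem.Set.add s2 (c :: tk.1, tk.2 + (if c != ch then 1 else 0))) st
        else PySem.Set.add st (ch :: tk.1, tk.2))
      = (fun st tk => PySem.Set.update st
          (if tk.2 < d then
            ['A', 'C', 'G', 'T'].map (fun c => (c :: tk.1, tk.2 + (if c != ch then 1 else 0)))
           else [(ch :: tk.1, tk.2)])) := by
  funext st tk
  split_ifs with h
  · rfl
  · rfl

theorem stepB_eq (d : Int) (ch : Char) (cur : PySem.Set (List Char × Int)) :
    stepB d cur ch = cur.foldl
      (fun st tk => PySem.Set.update st
        (if tk.2 < d then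
          ['A', 'C', 'G', 'T'].map (fun c => (c :: tk.1, tk.2 + (if c != ch then 1 else 0)))
         else [(ch :: tk.1, tk.2)]))
      PySem.Set.empty := by
  unfold stepB
  rw [bodyB_eq ch d]

-- unfolding equations of neighborsA
theorem neighborsA_one (x : Char) (d : Int) (hd : d ≠ 0) :
    neighborsA [x] d = [['A'], ['C'], ['G'], ['T']] := by
  rw [neighborsA.eq_def]; simp [hd]

theorem neighborsA_cons_cons (c b : Char) (q : List Char) (d : Int) (hd : d ≠ 0) :
    neighborsA (c :: b :: q) d =
      PySem.List.sorted
        ((neighborsA (b :: q) d).foldl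
          (fun acc t =>
            if (hammingA (b :: q) t).getD 0 < d then
              ['A', 'C', 'G', 'T'].foldl (fun a2 nuc => PySem.Set.add a2 (nuc :: t)) acc
            else PySem.Set.add acc (c :: t))
          PySem.Set.empty)
        (fun x => x) false := by
  rw [neighborsA.eq_def]; simp [hd]

-- A-side: the neighborhood lists are duplicate-free and consist of lists of the pattern's length
theorem A_nodup_len (d : Int) (hd : d ≠ 0) :
    ∀ (p : List Char), p ≠ [] →
      (neighborsA p d).Nodup ∧ ∀ t ∈ neighborsA p d, t.length = p.length := by
  intro p
  induction p with
  | nil => intro h; exact absurd rfl h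
  | cons a q ih =>
    intro _
    cases q with
    | nil =>
      rw [neighborsA_one a d hd]
      refine ⟨by decide, ?_⟩
      intro t ht
      simp at ht
      rcases ht with rfl | rfl | rfl | rfl <;> rfl
    | cons b q' =>
      have ihr := ih (by simp)
      rw [neighborsA_cons_cons a b q' d hd, bodyA_eq a (b :: q') d]
      constructor
      · have hnb := nodup_foldl_update
          (fun t => if (hammingA (b :: q') t).getD 0 < d then ['A', 'C', 'G', 'T'].map (fun nuc => nuc :: t) else [a :: t])
          (neighborsA (b :: q') d) PySem.Set.empty (by simp [PySem.Set.empty])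
        exact ((PySem.List.sorted_perm _ _ _).nodup_iff).mpr hnb
      · intro t ht
        rw [PySem.List.mem_sorted, mem_foldl_update] at ht
        rcases ht with h | ⟨t', ht', hmem⟩
        · simp [PySem.Set.empty] at h
        · have hlen := ihr.2 t' ht'
          split_ifs at hmem with hh
          · simp only [List.mem_map] at hmem
            obtain ⟨c, _, rfl⟩ := hmem
            simp [hlen]
          · simp only [List.mem_singleton] at hmem
            subst hmem
            simp [hlen]

-- A-side: membership at a cons-cons level
theorem A_mem_cons (d : Int) (hd : d ≠ 0) (c b : Char) (q : List Char) :
    ∀ y, y ∈ neighborsA (c :: b :: q) d ↔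
      ∃ t ∈ neighborsA (b :: q) d,
        (hamZ (b :: q) t < d ∧ y ∈ ['A', 'C', 'G', 'T'].map (fun nuc => nuc :: t)) ∨
        (¬ hamZ (b :: q) t < d ∧ y = c :: t) := by
  intro y
  rw [neighborsA_cons_cons c b q d hd, PySem.List.mem_sorted, bodyA_eq c (b :: q) d,
    mem_foldl_update]
  constructor
  · rintro (h | ⟨t, ht, hmem⟩)
    · simp [PySem.Set.empty] at h
    · refine ⟨t, ht, ?_⟩
      have hlen := (A_nodup_len d hd (b :: q) (by simp)).2 t ht
      rw [hammingA_eq (b :: q) t hlen] at hmem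
      simp only [Option.getD_some] at hmem
      split_ifs at hmem with hh
      · exact Or.inl ⟨hh, hmem⟩
      · simp only [List.mem_singleton] at hmem
        exact Or.inr ⟨hh, hmem⟩
  · rintro ⟨t, ht, hcase⟩
    refine Or.inr ⟨t, ht, ?_⟩
    have hlen := (A_nodup_len d hd (b :: q) (by simp)).2 t ht
    rw [hammingA_eq (b :: q) t hlen]
    simp only [Option.getD_some]
    rcases hcase with ⟨hh, hy⟩ | ⟨hh, rfl⟩
    · rw [if_pos hh]; exact hy
    · rw [if_neg hh]; simp

-- B-side loop invariant: after consuming the suffix q, the state holds exactly the pairs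
-- (t, Hamming distance of t to q) for t in A's neighborhood of q
theorem B_inv (d : Int) (hd : d ≠ 0) :
    ∀ (q : List Char) (hq : q ≠ []),
      ((q.dropLast.reverse).foldl (stepB d)
          (PySem.Set.ofList (['A', 'C', 'G', 'T'].map
            (fun c => ([c], if c == q.getLast hq then (0 : Int) else 1))))).Nodup ∧
      ∀ y : List Char × Int,
        y ∈ (q.dropLast.reverse).foldl (stepB d)
          (PySem.Set.ofList (['A', 'C', 'G', 'T'].map
            (fun c => ([c], if c == q.getLast hq then (0 : Int) else 1)))) ↔
        (y.1 ∈ neighborsA q d ∧ y.2 = hamZ q y.1) := by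
  intro q
  induction q with
  | nil => intro hq; exact absurd rfl hq
  | cons a q ih =>
    intro hq
    cases q with
    | nil =>
      have hrev : ([a] : List Char).dropLast.reverse = [] := rfl
      rw [hrev]
      simp only [List.foldl_nil, List.getLast_singleton]
      constructor
      · exact PySem.Set.nodup_ofList _
      · intro y
        rw [PySem.Set.mem_ofList, neighborsA_one a d hd]
        constructor
        · intro hy
          simp only [List.mem_map] at hy
          obtain ⟨c, hc, heq⟩ := hy
          subst heq
          refine ⟨?_, ?_⟩
          · fin_cases hc <;> simp
          · exact base_snd c a
        · rintro ⟨h1, h2⟩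
          obtain ⟨y1, y2⟩ := y
          simp only at h1 h2
          simp only [List.mem_cons, List.not_mem_nil, or_false] at h1
          simp only [List.mem_map]
          subst h2
          rcases h1 with rfl | rfl | rfl | rfl
          · exact ⟨'A', by simp, congrArg _ (base_snd 'A' a)⟩
          · exact ⟨'C', by simp, congrArg _ (base_snd 'C' a)⟩
          · exact ⟨'G', by simp, congrArg _ (base_snd 'G' a)⟩
          · exact ⟨'T', by simp, congrArg _ (base_snd 'T' a)⟩
    | cons b q' =>
      have hne : (b :: q') ≠ [] := by simp
      have ihr := ih hne
      have hrev : ((a :: b :: q').dropLast).reverse = ((b :: q').dropLast).reverse ++ [a] := by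
        rw [show (a :: b :: q').dropLast = a :: (b :: q').dropLast from rfl, List.reverse_cons]
      have hlast : (a :: b :: q').getLast hq = (b :: q').getLast hne := List.getLast_cons hne
      rw [hrev, hlast, List.foldl_append, List.foldl_cons, List.foldl_nil, stepB_eq]
      constructor
      · exact nodup_foldl_update _ _ _ (by simp [PySem.Set.empty])
      · rintro ⟨y1, y2⟩
        rw [mem_foldl_update]
        constructor
        · rintro (h | ⟨⟨t, k⟩, htk, hy⟩)
          · simp [PySem.Set.empty] at h
          · obtain ⟨ht, hk⟩ := (ihr.2 (t, k)).1 htk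
            simp only at ht hk
            subst hk
            by_cases hlt : hamZ (b :: q') t < d
            · rw [if_pos hlt] at hy
              simp only [List.mem_map] at hy
              obtain ⟨c, hc, heq⟩ := hy
              injection heq with e1 e2
              subst e1
              subst e2
              refine ⟨?_, ?_⟩
              · exact (A_mem_cons d hd a b q' _).2
                  ⟨t, ht, Or.inl ⟨hlt, by simp only [List.mem_map]; exact ⟨c, hc, rfl⟩⟩⟩
              · show hamZ (b :: q') t + (if c != a then 1 else 0) = hamZ (a :: b :: q') (c :: t)
                rw [hamZ_cons, bne_flip a c]
            · rw [if_neg hlt] at hy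
              simp only [List.mem_singleton] at hy
              injection hy with e1 e2
              subst e1
              subst e2
              refine ⟨(A_mem_cons d hd a b q' _).2 ⟨t, ht, Or.inr ⟨hlt, rfl⟩⟩, ?_⟩
              show hamZ (b :: q') t = hamZ (a :: b :: q') (a :: t)
              rw [hamZ_cons]
              simp
        · rintro ⟨hy1, hy2⟩
          simp only at hy1 hy2
          obtain ⟨t, ht, hcase⟩ := (A_mem_cons d hd a b q' y1).1 hy1
          refine Or.inr ⟨(t, hamZ (b :: q') t), (ihr.2 (t, hamZ (b :: q') t)).2 ⟨ht, rfl⟩, ?_⟩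
          rcases hcase with ⟨hlt, hmem⟩ | ⟨hge, hy⟩
          · rw [if_pos hlt]
            simp only [List.mem_map] at hmem
            obtain ⟨c, hc, hceq⟩ := hmem
            subst hceq
            subst hy2
            simp only [List.mem_map]
            exact ⟨c, hc, congrArg (Prod.mk (c :: t)) (by rw [hamZ_cons, bne_flip a c])⟩
          · rw [if_neg hge]
            subst hy
            subst hy2
            simp only [List.mem_singleton]
            exact congrArg (Prod.mk (a :: t)) (by rw [hamZ_cons]; simp)

-- the two elaborations of `sorted` (core List LT instance vs the LinearOrder projection) agree:
-- the LT instances are definitionally equal and Decidable instances are subsingletons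
theorem sorted_instEq (xs : List (List Char)) :
    @PySem.List.sorted (List Char) (List Char) List.instLT (fun a b => a.decidableLT b) xs (fun x => x) false
      = @PySem.List.sorted (List Char) (List Char) List.instLinearOrder.toLT List.instLinearOrder.toDecidableLT xs (fun x => x) false :=
  congrArg
    (fun inst : DecidableRel (· < · : List Char → List Char → Prop) =>
      @PySem.List.sorted (List Char) (List Char) List.instLT inst xs (fun x => x) false)
    (Subsingleton.elim _ _)

-- assembling the top-level equality from the loop invariant
theorem final_eq (d : Int) (hd : d ≠ 0) (a b : Char) (q' : List Char)
    (fin : List (List Char × Int)) (hnodup : fin.Nodup)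
    (hmem : ∀ y : List Char × Int,
      y ∈ fin ↔ (y.1 ∈ neighborsA (a :: b :: q') d ∧ y.2 = hamZ (a :: b :: q') y.1)) :
    neighborsA (a :: b :: q') d
      = PySem.List.sorted (fin.map (fun tk => tk.1)) (fun x => x) false := by
  have hA := A_nodup_len d hd (a :: b :: q') (by simp)
  have hinj : Function.Injective (fun t : List Char => (t, hamZ (a :: b :: q') t)) := by
    intro x y hxy
    simpa using congrArg Prod.fst hxy
  have hpn : ((neighborsA (a :: b :: q') d).map (fun t => (t, hamZ (a :: b :: q') t))).Nodup :=
    hA.1.map hinj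
  have hperm : fin.Perm
      ((neighborsA (a :: b :: q') d).map (fun t => (t, hamZ (a :: b :: q') t))) := by
    rw [List.perm_ext_iff_of_nodup hnodup hpn]
    intro z
    rw [hmem z]
    simp only [List.mem_map]
    constructor
    · rintro ⟨h1, h2⟩
      exact ⟨z.1, h1, by obtain ⟨z1, z2⟩ := z; simp only at h2 ⊢; rw [h2]⟩
    · rintro ⟨t, ht, rfl⟩
      exact ⟨ht, rfl⟩
  have hfst : (fin.map (fun tk : List Char × Int => tk.1)).Perm (neighborsA (a :: b :: q') d) := by
    have h2 := hperm.map (fun tk : List Char × Int => tk.1)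
    rw [List.map_map,
      show ((fun tk : List Char × Int => tk.1) ∘ fun t => (t, hamZ (a :: b :: q') t)) = id from rfl,
      List.map_id] at h2
    exact h2
  rw [neighborsA_cons_cons a b q' d hd] at hfst ⊢
  have hlem := PySem.List.sorted_eq_sorted_of_perm (fin.map (fun tk : List Char × Int => tk.1)) _
    (fun x => x) (fun _ _ h => h) (hfst.trans (PySem.List.sorted_perm _ _ _))
  exact (sorted_instEq _).trans (hlem.symm.trans (sorted_instEq _).symm)

-- ===== VERDICT (by name: the statement is the Claim_ definition above) =====
theorem neighbors_V2_spec : Claim_equal_neighbors_V2 := by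
  intro pattern d _ hpre
  obtain ⟨hne, hd, hlen⟩ := hpre
  show neighbors_V2 pattern d = neighbors_V2_alt pattern d
  cases hp : pattern.toList with
  | nil => exact absurd hp hne
  | cons a q =>
    cases q with
    | nil => exact absurd (by rw [hp]; rfl) hlen
    | cons b q' =>
      have hB := B_inv d hd (a :: b :: q') (by simp)
      unfold neighbors_V2 neighbors_V2_alt
      rw [hp, if_neg hd, if_neg (show ¬ ((a :: b :: q').length = 1) by simp),
        PySem.List.pyGet?_neg_one, List.getLast?_eq_some_getLast (by simp)]
      exact congrArg (List.map (fun t => String.ofList t)) (final_eq d hd a b q' _ hB.1 hB.2)
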